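-- pv_equiv track=rewrite | github.com/rfsbraz/parliament | scripts/data_processing/import_parliament_data.py | choose_optimal_file
-- ===== SOURCE A (Python) =====
-- def choose_optimal_file(file_group):
--     """Choose the best file from a group (prefer JSON over XML)"""
--     json_files = [f for f in file_group if f.get('type') in ['JSON']]
--     xml_files = [f for f in file_group if f.get('type') in ['XML']]
--     other_files = [f for f in file_group if f.get('type') not in ['JSON', 'XML']]
--
--     # Priority: JSON > XML > Others
--     if json_files:
--         return json_files[0]
--     elif xml_files:
--         return xml_files[0]
--     elif other_files:
--         return other_files[0]
--     else:
--         return file_group[0] if file_group else None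
-- ===== SOURCE B (Python) =====
-- def choose_optimal_file(file_group):
--     """Choose the best file from a group (prefer JSON over XML)"""
--     first_json = first_xml = first_other = None
--     for f in file_group:
--         t = f.get('type')
--         if t == 'JSON':
--             if first_json is None:
--                 first_json = f
--         elif t == 'XML':
--             if first_xml is None:
--                 first_xml = f
--         else:
--             if first_other is None:
--                 first_other = f
--     if first_json is not None:
--         return first_json
--     if first_xml is not None:
--         return first_xml
--     if first_other is not None:
--         return first_other
--     return None
-- ===== Notes on version B (the rewrite author's own statement) =====
-- stated objective: simpler
-- what changed: Replaces three list comprehensions (three full passes building lists) plus an if-chain with a single pass that records only the first file of each kind in three sentinels and returns by priority.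
import Mathlib
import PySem

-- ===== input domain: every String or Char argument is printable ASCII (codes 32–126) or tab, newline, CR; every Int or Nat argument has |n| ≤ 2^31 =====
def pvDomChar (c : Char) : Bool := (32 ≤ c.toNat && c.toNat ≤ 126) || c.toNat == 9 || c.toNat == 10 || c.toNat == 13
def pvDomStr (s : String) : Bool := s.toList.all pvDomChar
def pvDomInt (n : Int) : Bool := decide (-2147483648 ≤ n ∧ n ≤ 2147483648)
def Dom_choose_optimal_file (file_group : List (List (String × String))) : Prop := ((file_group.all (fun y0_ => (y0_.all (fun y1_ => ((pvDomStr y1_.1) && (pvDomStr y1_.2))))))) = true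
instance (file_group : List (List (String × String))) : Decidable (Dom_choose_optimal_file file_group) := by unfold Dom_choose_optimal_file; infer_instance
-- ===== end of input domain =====

-- B replaces A's three list comprehensions + if-chain with a single pass keeping one sentinel per category (objective: simpler).

-- ===== PORT A =====
def choose_optimal_file (file_group : List (List (String × String))) : Option (List (String × String)) :=
  let json_files := file_group.filter (fun f => PySem.Dict.get? (PySem.Dict.mk f) "type" == some "JSON")
  let xml_files := file_group.filter (fun f => PySem.Dict.get? (PySem.Dict.mk f) "type" == some "XML")
  let other_files := file_group.filter (fun f =>
    !(PySem.Dict.get? (PySem.Dict.mk f) "type" == some "JSON") && !(PySem.Dict.get? (PySem.Dict.mk f) "type" == some "XML"))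
  if json_files ≠ [] then json_files.head?
  else if xml_files ≠ [] then xml_files.head?
  else if other_files ≠ [] then other_files.head?
  else if file_group ≠ [] then file_group.head? else none

-- ===== PORT B =====
-- the single pass: carries (first_json, first_xml, first_other)
def cofLoop (fg : List (List (String × String)))
    (fj fx fo : Option (List (String × String))) :
    Option (List (String × String)) × Option (List (String × String)) × Option (List (String × String)) :=
  match fg with
  | [] => (fj, fx, fo)
  | f :: rest =>
    let t := PySem.Dict.get? (PySem.Dict.mk f) "type"
    if t == some "JSON" then cofLoop rest (if fj = none then some f else fj) fx fo
    else if t == some "XML" then cofLoop rest fj (if fx = none then some f else fx) fo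
    else cofLoop rest fj fx (if fo = none then some f else fo)

def choose_optimal_file_alt (file_group : List (List (String × String))) : Option (List (String × String)) :=
  match cofLoop file_group none none none with
  | (some j, _, _) => some j
  | (none, some x, _) => some x
  | (none, none, some o) => some o
  | (none, none, none) => none

-- ===== PRECONDITION & SPEC =====
def Spec_choose_optimal_file (file_group : List (List (String × String))) (out : Option (List (String × String))) : Prop := out = choose_optimal_file_alt file_group
instance (file_group : List (List (String × String))) (out : Option (List (String × String))) : Decidable (Spec_choose_optimal_file file_group out) := by unfold Spec_choose_optimal_file; infer_instance

-- ===== CLAIM (what is proved, stated in full; the proofs are below) =====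
def Claim_equal_choose_optimal_file : Prop := ∀ (file_group : List (List (String × String))), Dom_choose_optimal_file file_group → Spec_choose_optimal_file file_group (choose_optimal_file file_group)

-- ===== LEMMAS AND PROOFS =====

-- "first of each category already found, or first in the rest": cofLoop returns the heads of A's three filtered lists
def oget {α : Type} (a b : Option α) : Option α :=
  match a with
  | some x => some x
  | none => b

theorem cofLoop_spec (fg : List (List (String × String)))
    (fj fx fo : Option (List (String × String))) :
    cofLoop fg fj fx fo =
      (oget fj ((fg.filter (fun f => PySem.Dict.get? (PySem.Dict.mk f) "type" == some "JSON")).head?),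
       oget fx ((fg.filter (fun f => PySem.Dict.get? (PySem.Dict.mk f) "type" == some "XML")).head?),
       oget fo ((fg.filter (fun f =>
         !(PySem.Dict.get? (PySem.Dict.mk f) "type" == some "JSON") && !(PySem.Dict.get? (PySem.Dict.mk f) "type" == some "XML"))).head?)) := by
  induction fg generalizing fj fx fo with
  | nil => cases fj <;> cases fx <;> cases fo <;> simp [cofLoop, oget]
  | cons f rest ih =>
    simp only [cofLoop]
    by_cases hj : PySem.Dict.get? (PySem.Dict.mk f) "type" = some "JSON"
    · rw [if_pos (by simp [hj])]
      rw [ih]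
      cases fj <;> simp [oget, hj]
    · by_cases hx : PySem.Dict.get? (PySem.Dict.mk f) "type" = some "XML"
      · rw [if_neg (by simp [hj]), if_pos (by simp [hx])]
        rw [ih]
        cases fx <;> simp [oget, hx]
      · rw [if_neg (by simp [hj]), if_neg (by simp [hx])]
        rw [ih]
        cases fo <;> simp [oget, hj, hx]

-- ===== VERDICT (by name: the statement is the Claim_ definition above) =====
theorem choose_optimal_file_spec : Claim_equal_choose_optimal_file := by
  intro fg _
  unfold Spec_choose_optimal_file choose_optimal_file choose_optimal_file_alt
  rw [cofLoop_spec]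
  simp only [oget]
  rcases hJ : (fg.filter (fun f => PySem.Dict.get? (PySem.Dict.mk f) "type" == some "JSON")).head? with _ | j
  · have hJe := List.head?_eq_none_iff.mp hJ
    rcases hX : (fg.filter (fun f => PySem.Dict.get? (PySem.Dict.mk f) "type" == some "XML")).head? with _ | x
    · have hXe := List.head?_eq_none_iff.mp hX
      rcases hO : (fg.filter (fun f =>
          !(PySem.Dict.get? (PySem.Dict.mk f) "type" == some "JSON") &&
          !(PySem.Dict.get? (PySem.Dict.mk f) "type" == some "XML"))).head? with _ | o
      · -- all three filters empty: fg must be empty, so A's final fallback is none too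
        have hOe := List.head?_eq_none_iff.mp hO
        have hfg : fg = [] := by
          cases fg with
          | nil => rfl
          | cons f rest =>
            exfalso
            have h1 := (List.filter_eq_nil_iff.mp hJe) f (List.mem_cons_self ..)
            have h2 := (List.filter_eq_nil_iff.mp hXe) f (List.mem_cons_self ..)
            have h3 := (List.filter_eq_nil_iff.mp hOe) f (List.mem_cons_self ..)
            simp at h1 h2 h3
            exact absurd (h3 h1) h2
        subst hfg
        rfl
      · have hne : (fg.filter (fun f =>
            !(PySem.Dict.get? (PySem.Dict.mk f) "type" == some "JSON") &&
            !(PySem.Dict.get? (PySem.Dict.mk f) "type" == some "XML"))) ≠ [] := by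
          intro h; rw [h] at hO; simp at hO
        rw [if_neg (by simp [hJe]), if_neg (by simp [hXe])]
        try rw [if_pos hne]
        try rfl
    · have hne : (fg.filter (fun f => PySem.Dict.get? (PySem.Dict.mk f) "type" == some "XML")) ≠ [] := by
        intro h; rw [h] at hX; simp at hX
      rw [if_neg (by simp [hJe])]
      try rw [if_pos hne]
      try rfl
  · have hne : (fg.filter (fun f => PySem.Dict.get? (PySem.Dict.mk f) "type" == some "JSON")) ≠ [] := by
      intro h; rw [h] at hJ; simp at hJ
    try rw [if_pos hne]
    try rfl
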